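-- pv_equiv track=rewrite | github.com/Agro-Marin/tools | code_ordering/odoo_field_attribute_reorder.py | _order_attributes
-- ===== SOURCE A (Python) =====
-- def _order_attributes(
--     attributes: list[tuple[str, str, bool]], order: list[str]
-- ) -> list[tuple[str, str, bool]]:
--     """Order attributes according to the specified order."""
--
--     # Extract comments separately (they should be preserved but not reordered)
--     comments = None
--     regular_attrs = []
--
--     for attr in attributes:
--         if attr[0] == "_comments":
--             comments = attr
--         else:
--             regular_attrs.append(attr)
--
--     # Separate positional and named arguments
--     positional = [attr for attr in regular_attrs if attr[2]]
--     named = {attr[0]: attr for attr in regular_attrs if not attr[2]}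
--
--     # Build ordered list
--     ordered = []
--
--     # Add positional arguments first
--     ordered.extend(positional)
--
--     # Add named arguments in order
--     for attr_name in order:
--         if attr_name in named:
--             ordered.append(named[attr_name])
--             del named[attr_name]
--
--     # Add any remaining named arguments not in the order list
--     for attr in named.values():
--         ordered.append(attr)
--
--     # Add comments at the end (they'll be placed appropriately during formatting)
--     if comments:
--         ordered.append(comments)
--
--     return ordered
-- ===== SOURCE B (Python) =====
-- def _order_attributes(
--     attributes: list[tuple[str, str, bool]], order: list[str]
-- ) -> list[tuple[str, str, bool]]:
--     """Order attributes according to the specified order (rank-table + stable sort)."""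
--     comments = None
--     positional = []
--     named = {}
--     for attr in attributes:
--         if attr[0] == "_comments":
--             comments = attr
--         elif attr[2]:
--             positional.append(attr)
--         else:
--             named[attr[0]] = attr
--
--     # rank: first-occurrence index in `order`; names not in `order` get
--     # len(order) + their position in `named`, keeping dict order among leftovers.
--     rank = {}
--     for i, name in enumerate(order):
--         rank.setdefault(name, i)
--     for j, name in enumerate(named):
--         rank.setdefault(name, len(order) + j)
--
--     result = positional + sorted(named.values(), key=lambda a: rank[a[0]])
--     if comments:
--         result.append(comments)
--     return result
-- ===== Notes on version B (the rewrite author's own statement) =====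
-- stated objective: alternative
-- what changed: A's pick-and-delete loop over `order` followed by a sweep of the leftover dict is replaced by a precomputed first-occurrence rank table (setdefault over enumerate) and a single stable sort of the named values by rank.
import Mathlib
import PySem

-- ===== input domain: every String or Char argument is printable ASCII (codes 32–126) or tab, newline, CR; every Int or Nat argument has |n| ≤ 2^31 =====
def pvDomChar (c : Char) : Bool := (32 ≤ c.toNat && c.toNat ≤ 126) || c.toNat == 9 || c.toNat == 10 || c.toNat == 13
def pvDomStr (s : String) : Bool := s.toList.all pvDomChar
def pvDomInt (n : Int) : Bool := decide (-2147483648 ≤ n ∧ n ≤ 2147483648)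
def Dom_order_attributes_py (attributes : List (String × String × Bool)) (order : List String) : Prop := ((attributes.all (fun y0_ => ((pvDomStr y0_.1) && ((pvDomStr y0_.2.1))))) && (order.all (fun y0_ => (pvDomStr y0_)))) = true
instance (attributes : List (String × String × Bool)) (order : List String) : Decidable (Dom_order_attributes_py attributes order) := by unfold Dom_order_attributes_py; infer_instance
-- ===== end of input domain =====

-- B replaces A's pick-and-delete loop over `order` (plus leftover-dict sweep) by a
-- precomputed first-occurrence rank table and one stable sort of the named values
-- (objective: alternative decomposition, same exact output).

-- ===== PORT A =====
-- first loop of A: split comments / regular_attrs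
def aSplitStep (st : Option (String × String × Bool) × List (String × String × Bool))
    (attr : String × String × Bool) :
    Option (String × String × Bool) × List (String × String × Bool) :=
  if attr.1 == "_comments" then (some attr, st.2) else (st.1, st.2 ++ [attr])

-- A's loop over `order`: pick from the dict and delete
def aOrderStep
    (st : List (String × String × Bool) × PySem.Dict String (String × String × Bool))
    (attr_name : String) :
    List (String × String × Bool) × PySem.Dict String (String × String × Bool) :=
  if st.2.contains attr_name then
    -- named[attr_name]: the contains-guard makes getD's default unreachable
    (st.1 ++ [st.2.getD attr_name ("", "", false)], st.2.erase attr_name)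
  else st

def order_attributes_py (attributes : List (String × String × Bool)) (order : List String) :
    List (String × String × Bool) :=
  let cr := attributes.foldl aSplitStep (none, [])
  let comments := cr.1
  let regular_attrs := cr.2
  let positional := regular_attrs.filter (fun attr => attr.2.2)
  let named : PySem.Dict String (String × String × Bool) :=
    (regular_attrs.filter (fun attr => !attr.2.2)).foldl
      (fun d attr => d.insert attr.1 attr) PySem.Dict.empty
  let st := order.foldl aOrderStep (positional, named)
  let ordered := st.2.values.foldl (fun acc attr => acc ++ [attr]) st.1
  match comments with
  | some c => ordered ++ [c]    -- `if comments:` — a 3-tuple is always truthy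
  | none => ordered

-- ===== PORT B =====
-- B's single splitting pass: comments / positional / named dict
def bSplitStep
    (st : Option (String × String × Bool) × List (String × String × Bool) ×
          PySem.Dict String (String × String × Bool))
    (attr : String × String × Bool) :
    Option (String × String × Bool) × List (String × String × Bool) ×
      PySem.Dict String (String × String × Bool) :=
  if attr.1 == "_comments" then (some attr, st.2.1, st.2.2)
  else if attr.2.2 then (st.1, st.2.1 ++ [attr], st.2.2)
  else (st.1, st.2.1, st.2.2.insert attr.1 attr)

def order_attributes_py_alt (attributes : List (String × String × Bool)) (order : List String) :
    List (String × String × Bool) :=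
  let st := attributes.foldl bSplitStep (none, [], PySem.Dict.empty)
  let comments := st.1
  let positional := st.2.1
  let named := st.2.2
  let rank : PySem.Dict String Int :=
    (PySem.List.enumerate order 0).foldl (fun r p => r.setdefault p.2 p.1) PySem.Dict.empty
  let rank :=
    (PySem.List.enumerate named.keys 0).foldl
      (fun r p => r.setdefault p.2 ((order.length : Int) + p.1)) rank
  -- rank[a[0]]: every named key got a rank in the second loop, so getD's default is unreachable
  let result := positional ++ PySem.List.sorted named.values (fun a => rank.getD a.1 0)
  match comments with
  | some c => result ++ [c]
  | none => result

-- ===== PRECONDITION & SPEC =====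
def Spec_order_attributes_py (attributes : List (String × String × Bool)) (order : List String) (out : List (String × String × Bool)) : Prop := out = order_attributes_py_alt attributes order
instance (attributes : List (String × String × Bool)) (order : List String) (out : List (String × String × Bool)) : Decidable (Spec_order_attributes_py attributes order out) := by unfold Spec_order_attributes_py; infer_instance

-- ===== CLAIM (what is proved, stated in full; the proofs are below) =====
def Claim_equal_order_attributes_py : Prop := ∀ (attributes : List (String × String × Bool)) (order : List String), Dom_order_attributes_py attributes order → Spec_order_attributes_py attributes order (order_attributes_py attributes order)

-- ===== LEMMAS AND PROOFS =====

-- the comments accumulator, shared by both first loops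
def cStep (c : Option (String × String × Bool)) (attr : String × String × Bool) :
    Option (String × String × Bool) :=
  if attr.1 == "_comments" then some attr else c

theorem aSplit_eq (attrs : List (String × String × Bool))
    (c : Option (String × String × Bool)) (r : List (String × String × Bool)) :
    attrs.foldl aSplitStep (c, r) =
      (attrs.foldl cStep c, r ++ attrs.filter (fun a => !(a.1 == "_comments"))) := by
  induction attrs generalizing c r with
  | nil => simp
  | cons a t ih =>
    by_cases h : (a.1 == "_comments") = true <;>
      simp [aSplitStep, cStep, h, ih, List.append_assoc]

theorem bSplit_eq (attrs : List (String × String × Bool))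
    (c : Option (String × String × Bool)) (p : List (String × String × Bool))
    (n : PySem.Dict String (String × String × Bool)) :
    attrs.foldl bSplitStep (c, p, n) =
      (attrs.foldl cStep c,
       p ++ (attrs.filter (fun a => !(a.1 == "_comments"))).filter (fun a => a.2.2),
       ((attrs.filter (fun a => !(a.1 == "_comments"))).filter (fun a => !a.2.2)).foldl
         (fun d a => d.insert a.1 a) n) := by
  induction attrs generalizing c p n with
  | nil => simp
  | cons a t ih =>
    by_cases h : (a.1 == "_comments") = true
    · simp [bSplitStep, cStep, h, ih]
    · by_cases h2 : a.2.2 <;>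
        simp [bSplitStep, cStep, h, h2, ih, List.append_assoc]

-- A's order loop, split into the picked list and the final dict
def aPicks (d : PySem.Dict String (String × String × Bool)) (order : List String) :
    List (String × String × Bool) :=
  (order.foldl aOrderStep ([], d)).1

def aFin (d : PySem.Dict String (String × String × Bool)) (order : List String) :
    PySem.Dict String (String × String × Bool) :=
  (order.foldl aOrderStep ([], d)).2

theorem aOrder_acc (order : List String) (acc : List (String × String × Bool))
    (d : PySem.Dict String (String × String × Bool)) :
    order.foldl aOrderStep (acc, d) = (acc ++ aPicks d order, aFin d order) := by
  induction order generalizing acc d with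
  | nil => simp [aPicks, aFin]
  | cons o t ih =>
    by_cases hc : d.contains o = true
    · simp only [aPicks, aFin, List.foldl_cons, aOrderStep, hc, if_true]
      rw [ih, ih]
      simp
    · simp only [aPicks, aFin, List.foldl_cons, aOrderStep, hc, if_false, Bool.false_eq_true]
      rw [ih, ih]
      simp

theorem picks_cons (o : String) (rest : List String)
    (d : PySem.Dict String (String × String × Bool)) :
    aPicks d (o :: rest) =
      if d.contains o then d.getD o ("", "", false) :: aPicks (d.erase o) rest
      else aPicks d rest := by
  by_cases hc : d.contains o = true
  · simp only [aPicks, List.foldl_cons, aOrderStep, hc, if_true]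
    simp [aOrder_acc]
  · simp only [aPicks, List.foldl_cons, aOrderStep, hc, if_false, Bool.false_eq_true]

theorem fin_cons (o : String) (rest : List String)
    (d : PySem.Dict String (String × String × Bool)) :
    aFin d (o :: rest) = if d.contains o then aFin (d.erase o) rest else aFin d rest := by
  by_cases hc : d.contains o = true
  · simp only [aFin, List.foldl_cons, aOrderStep, hc, if_true]
    simp [aOrder_acc]
  · simp only [aFin, List.foldl_cons, aOrderStep, hc, if_false, Bool.false_eq_true]

theorem fin_eq_filter (order : List String) (d : PySem.Dict String (String × String × Bool)) :
    aFin d order = PySem.Dict.mk (d.items.filter (fun p => !(order.contains p.1))) := by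
  induction order generalizing d with
  | nil => simp [aFin]
  | cons o t ih =>
    rw [fin_cons]
    by_cases hc : d.contains o = true
    · rw [if_pos hc, ih]
      congr 1
      have he : (d.erase o).items = d.items.filter (fun p => !(p.1 == o)) := rfl
      rw [he, List.filter_filter]
      apply List.filter_congr
      intro p _
      by_cases h1 : p.1 = o <;> by_cases h2 : p.1 ∈ t <;>
        simp [h1, h2]
    · rw [if_neg (by simp [hc]), ih]
      congr 1
      apply List.filter_congr
      intro p hp
      have hpo : p.1 ≠ o := by
        intro e
        have hco : d.contains o = true := by
          simp only [PySem.Dict.contains, List.any_eq_true]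
          exact ⟨p, hp, by simp [e]⟩
        simp [hco] at hc
      by_cases h2 : p.1 ∈ t <;> simp [hpo, h2]

theorem contains_erase_imp {d : PySem.Dict String (String × String × Bool)} {o n : String}
    (h : (d.erase o).contains n = true) : d.contains n = true ∧ n ≠ o := by
  simp only [PySem.Dict.contains, PySem.Dict.erase, List.any_eq_true] at h ⊢
  obtain ⟨p, hp, hpn⟩ := h
  rw [List.mem_filter] at hp
  refine ⟨⟨p, hp.1, hpn⟩, ?_⟩
  intro e
  have h1 : p.1 = n := by simpa using hpn
  have h2 : (p.1 == o) = false := by simpa using hp.2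
  rw [h1, e] at h2
  simp at h2

theorem nodup_keys_erase (d : PySem.Dict String (String × String × Bool)) (o : String)
    (h : d.keys.Nodup) : (d.erase o).keys.Nodup := by
  have hs : (d.erase o).keys.Sublist d.keys :=
    List.Sublist.map _ List.filter_sublist
  exact h.sublist hs

-- self-keyed dicts: every item is (attr.1, attr)
def SelfKeyed (d : PySem.Dict String (String × String × Bool)) : Prop :=
  ∀ p ∈ d.items, p.2.1 = p.1

theorem selfKeyed_erase {d : PySem.Dict String (String × String × Bool)} (o : String)
    (h : SelfKeyed d) : SelfKeyed (d.erase o) := by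
  intro p hp
  have : p ∈ d.items := List.mem_of_mem_filter hp
  exact h p this

theorem selfKeyed_named (l : List (String × String × Bool)) :
    SelfKeyed (l.foldl (fun d a => d.insert a.1 a) PySem.Dict.empty) := by
  have aux : ∀ (l : List (String × String × Bool))
      (d : PySem.Dict String (String × String × Bool)), SelfKeyed d →
      SelfKeyed (l.foldl (fun d a => d.insert a.1 a) d) := by
    intro l
    induction l with
    | nil => intro d h; exact h
    | cons a t ih =>
      intro d h
      refine ih _ ?_
      intro p hp
      rcases (PySem.Dict.mem_items_insert _ _ _ _).mp hp with h1 | h2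
      · rw [h1]
      · exact h p h2.1
  exact aux l PySem.Dict.empty (by intro p hp; simp [PySem.Dict.empty] at hp)

theorem items_perm_filter (l : List (String × (String × String × Bool)))
    (o : String) (v : String × String × Bool)
    (hn : (l.map (·.1)).Nodup) (hm : (o, v) ∈ l) :
    l.Perm ((o, v) :: l.filter (fun p => !(p.1 == o))) := by
  induction l with
  | nil => simp at hm
  | cons a t ih =>
    rcases List.nodup_cons.mp hn with ⟨ha, ht⟩
    rcases List.mem_cons.mp hm with h1 | h2
    · subst h1
      have hft : t.filter (fun p => !(p.1 == o)) = t := by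
        rw [List.filter_eq_self]
        intro p hp
        have hne : p.1 ≠ o := by
          intro e
          exact ha (List.mem_map.mpr ⟨p, hp, e⟩)
        simp [hne]
      simp [hft]
    · have hao : a.1 ≠ o := by
        intro e
        have hmem : o ∈ t.map (fun x => x.1) := List.mem_map.mpr ⟨(o, v), h2, rfl⟩
        rw [← e] at hmem
        exact ha hmem
      have : (a :: t).filter (fun p => !(p.1 == o)) =
          a :: t.filter (fun p => !(p.1 == o)) := by
        simp [hao]
      rw [this]
      exact ((ih ht h2).cons a).trans (List.Perm.swap _ _ _)

theorem getD_self_key {d : PySem.Dict String (String × String × Bool)} {o : String}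
    (hc : d.contains o = true) :
    d.get? o = some (d.getD o ("", "", false)) ∧ (o, d.getD o ("", "", false)) ∈ d.items := by
  rw [PySem.Dict.contains_eq_isSome_get?] at hc
  cases hg : d.get? o with
  | none => rw [hg] at hc; simp at hc
  | some v =>
    have hgd : d.getD o ("", "", false) = v := PySem.Dict.getD_of_get?_eq_some _ _ hg
    rw [hgd]
    exact ⟨rfl, PySem.Dict.mem_items_of_get?_eq_some _ hg⟩

theorem values_perm (d : PySem.Dict String (String × String × Bool)) (o : String)
    (hn : d.keys.Nodup) (hc : d.contains o = true) :
    d.values.Perm (d.getD o ("", "", false) :: (d.erase o).values) := by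
  obtain ⟨hg, hm⟩ := getD_self_key hc
  have hp := items_perm_filter d.items o (d.getD o ("", "", false))
    (by simpa only [PySem.Dict.keys] using hn) hm
  have := hp.map (fun p => p.2)
  simpa [PySem.Dict.values, PySem.Dict.erase] using this

theorem picks_mem (order : List String) (d : PySem.Dict String (String × String × Bool))
    (hsk : SelfKeyed d) :
    ∀ p ∈ aPicks d order, p.1 ∈ order ∧ d.contains p.1 = true := by
  induction order generalizing d with
  | nil => intro p hp; simp [aPicks] at hp
  | cons o t ih =>
    intro p hp
    rw [picks_cons] at hp
    by_cases hc : d.contains o = true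
    · rw [if_pos hc] at hp
      rcases List.mem_cons.mp hp with h1 | h2
      · obtain ⟨hg, hm⟩ := getD_self_key (d := d) (o := o) hc
        have hkey : p.1 = o := by rw [h1]; exact hsk _ hm
        exact ⟨by rw [hkey]; exact List.mem_cons_self, by rw [hkey]; exact hc⟩
      · obtain ⟨hin, hcc⟩ := ih (d.erase o) (selfKeyed_erase o hsk) p h2
        obtain ⟨hcd, _⟩ := contains_erase_imp hcc
        exact ⟨List.mem_cons_of_mem _ hin, hcd⟩
    · rw [if_neg hc] at hp
      obtain ⟨hin, hcc⟩ := ih d hsk p hp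
      exact ⟨List.mem_cons_of_mem _ hin, hcc⟩

theorem nodup_pairwise_idxOf {l : List String} (h : l.Nodup) :
    l.Pairwise (fun a b => List.idxOf a l < List.idxOf b l) := by
  induction l with
  | nil => simp
  | cons a t ih =>
    rcases List.nodup_cons.mp h with ⟨ha, ht⟩
    rw [List.pairwise_cons]
    constructor
    · intro b hb
      have hba : (a == b) = false := by
        have : a ≠ b := fun e => ha (e ▸ hb)
        simpa using this
      simp [List.idxOf_cons, hba]
    · refine (ih ht).imp_of_mem ?_
      intro x y hx hy hr
      have hax : (a == x) = false := by
        have : a ≠ x := fun e => ha (e ▸ hx)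
        simpa using this
      have hay : (a == y) = false := by
        have : a ≠ y := fun e => ha (e ▸ hy)
        simpa using this
      simp [List.idxOf_cons, hax, hay]
      omega

theorem picks_pairwise (order : List String) (d : PySem.Dict String (String × String × Bool))
    (hsk : SelfKeyed d) :
    (aPicks d order).Pairwise (fun a b => List.idxOf a.1 order < List.idxOf b.1 order) := by
  induction order generalizing d with
  | nil => simp [aPicks]
  | cons o t ih =>
    rw [picks_cons]
    by_cases hc : d.contains o = true
    · rw [if_pos hc]
      rw [List.pairwise_cons]
      have hkey : (d.getD o ("", "", false)).1 = o := hsk _ (getD_self_key hc).2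
      constructor
      · intro b hb
        obtain ⟨hbt, hbc⟩ := picks_mem t (d.erase o) (selfKeyed_erase o hsk) b hb
        obtain ⟨_, hbo⟩ := contains_erase_imp hbc
        have h1 : List.idxOf (d.getD o ("", "", false)).1 (o :: t) = 0 := by
          simp [hkey]
        have h2 : (o == b.1) = false := by simpa using (Ne.symm hbo)
        rw [h1]
        simp [List.idxOf_cons, h2]
      · refine (ih (d.erase o) (selfKeyed_erase o hsk)).imp_of_mem ?_
        intro x y hx hy hr
        obtain ⟨_, hxc⟩ := picks_mem t (d.erase o) (selfKeyed_erase o hsk) x hx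
        obtain ⟨_, hyc⟩ := picks_mem t (d.erase o) (selfKeyed_erase o hsk) y hy
        have hxo : (o == x.1) = false := by simpa using (Ne.symm (contains_erase_imp hxc).2)
        have hyo : (o == y.1) = false := by simpa using (Ne.symm (contains_erase_imp hyc).2)
        simp [List.idxOf_cons, hxo, hyo]
        omega
    · rw [if_neg hc]
      refine (ih d hsk).imp_of_mem ?_
      intro x y hx hy hr
      have hxo : (o == x.1) = false := by
        have : x.1 ≠ o := by
          intro e
          obtain ⟨_, hxc⟩ := picks_mem t d hsk x hx
          rw [e] at hxc
          simp [hxc] at hc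
        simpa using (Ne.symm this)
      have hyo : (o == y.1) = false := by
        have : y.1 ≠ o := by
          intro e
          obtain ⟨_, hyc⟩ := picks_mem t d hsk y hy
          rw [e] at hyc
          simp [hyc] at hc
        simpa using (Ne.symm this)
      simp [List.idxOf_cons, hxo, hyo]
      omega

theorem tail_perm (order : List String) (d : PySem.Dict String (String × String × Bool))
    (hn : d.keys.Nodup) :
    (aPicks d order ++ (aFin d order).values).Perm d.values := by
  induction order generalizing d with
  | nil => simp [aPicks, aFin]
  | cons o t ih =>
    rw [picks_cons, fin_cons]
    by_cases hc : d.contains o = true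
    · rw [if_pos hc, if_pos hc]
      rw [List.cons_append]
      have h1 := ih (d.erase o) (nodup_keys_erase d o hn)
      have h2 := values_perm d o hn hc
      exact (h1.cons _).trans h2.symm
    · rw [if_neg hc, if_neg hc]
      exact ih d hn

-- the setdefault-over-enumerate loop: first occurrence wins
theorem sd_loop_get? (f : Int → Int) (l : List String) (s : Int)
    (r : PySem.Dict String Int) (n : String) :
    ((PySem.List.enumerate l s).foldl (fun r p => r.setdefault p.2 (f p.1)) r).get? n =
      if r.contains n then r.get? n
      else if n ∈ l then some (f (s + (List.idxOf n l : Int))) else r.get? n := by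
  induction l generalizing s r with
  | nil => simp [PySem.List.enumerate_nil]
  | cons x xs ih =>
    rw [PySem.List.enumerate_cons, List.foldl_cons, ih]
    by_cases hx : n = x
    · subst hx
      by_cases hc : r.contains n = true
      · rw [PySem.Dict.setdefault_of_contains _ _ hc]
        simp [hc]
      · have hgnone : r.get? n = none := by
          rw [PySem.Dict.contains_eq_isSome_get?] at hc
          cases hgg : r.get? n
          · rfl
          · rw [hgg] at hc; simp at hc
        have h1 : (r.setdefault n (f s)).get? n = some (f s) := by
          rw [PySem.Dict.get?_setdefault_self, hgnone]; rfl
        have h2 : (r.setdefault n (f s)).contains n = true := by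
          rw [PySem.Dict.contains_eq_isSome_get?, h1]; rfl
        have hidx : List.idxOf n (n :: xs) = 0 := by simp
        simp [h2, h1, hc, hidx]
    · have hgne : (r.setdefault x (f s)).get? n = r.get? n :=
        PySem.Dict.get?_setdefault_of_ne _ _ hx
      have hcne : (r.setdefault x (f s)).contains n = r.contains n := by
        rw [PySem.Dict.contains_eq_isSome_get?, PySem.Dict.contains_eq_isSome_get?, hgne]
      rw [hgne, hcne]
      by_cases hc : r.contains n = true
      · simp [hc]
      · have hxn : (x == n) = false := by
          have hne : x ≠ n := fun e => hx e.symm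
          simpa using hne
        have hidx : List.idxOf n (x :: xs) = List.idxOf n xs + 1 := by
          simp [List.idxOf_cons, hxn]
        rw [if_neg hc, hidx]
        by_cases hm : n ∈ xs
        · simp only [hm, if_true, List.mem_cons, hx, false_or]
          simp [hc]
          congr 1
          ring
        · simp [List.mem_cons, hx, hm]

-- B's rank table
def rankB (order : List String) (ks : List String) : PySem.Dict String Int :=
  (PySem.List.enumerate ks 0).foldl
    (fun r p => r.setdefault p.2 ((order.length : Int) + p.1))
    ((PySem.List.enumerate order 0).foldl (fun r p => r.setdefault p.2 p.1) PySem.Dict.empty)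

theorem rank1_get? (order : List String) (n : String) :
    ((PySem.List.enumerate order 0).foldl (fun r p => r.setdefault p.2 p.1)
        PySem.Dict.empty).get? n =
      if n ∈ order then some ((List.idxOf n order : Int)) else none := by
  rw [show (fun (r : PySem.Dict String Int) (p : Int × String) => r.setdefault p.2 p.1) =
      (fun r p => r.setdefault p.2 ((fun j => j) p.1)) from rfl]
  rw [sd_loop_get? (fun j => j) order 0 PySem.Dict.empty n]
  simp [PySem.Dict.contains_empty, PySem.Dict.get?_empty]

theorem rank_in (order ks : List String) (n : String) (h : n ∈ order) :
    (rankB order ks).getD n 0 = (List.idxOf n order : Int) := by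
  unfold rankB
  rw [PySem.Dict.getD_eq_get?_getD]
  rw [show (fun (r : PySem.Dict String Int) (p : Int × String) =>
      r.setdefault p.2 ((order.length : Int) + p.1)) =
      (fun r p => r.setdefault p.2 ((fun j => (order.length : Int) + j) p.1)) from rfl]
  rw [sd_loop_get? (fun j => (order.length : Int) + j) ks 0 _ n]
  rw [PySem.Dict.contains_eq_isSome_get?, rank1_get?]
  simp [h]

theorem rank_out (order ks : List String) (n : String) (h : n ∉ order) (hk : n ∈ ks) :
    (rankB order ks).getD n 0 = (order.length : Int) + (List.idxOf n ks : Int) := by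
  unfold rankB
  rw [PySem.Dict.getD_eq_get?_getD]
  rw [show (fun (r : PySem.Dict String Int) (p : Int × String) =>
      r.setdefault p.2 ((order.length : Int) + p.1)) =
      (fun r p => r.setdefault p.2 ((fun j => (order.length : Int) + j) p.1)) from rfl]
  rw [sd_loop_get? (fun j => (order.length : Int) + j) ks 0 _ n]
  rw [PySem.Dict.contains_eq_isSome_get?, rank1_get?]
  simp [h, hk]

theorem sorted_eq_tail (order : List String) (d : PySem.Dict String (String × String × Bool))
    (hn : d.keys.Nodup) (hsk : SelfKeyed d) :
    PySem.List.sorted d.values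
      (fun a => ((PySem.List.enumerate d.keys 0).foldl
          (fun r p => r.setdefault p.2 ((order.length : Int) + p.1))
          ((PySem.List.enumerate order 0).foldl (fun r p => r.setdefault p.2 p.1)
            PySem.Dict.empty)).getD a.1 0) =
      aPicks d order ++ (aFin d order).values := by
  show PySem.List.sorted d.values (fun a => (rankB order d.keys).getD a.1 0) = _
  apply PySem.List.sorted_eq_of_perm_of_pairwise_lt
  · exact tail_perm order d hn
  · rw [fin_eq_filter, List.pairwise_append]
    refine ⟨?_, ?_, ?_⟩
    · refine (picks_pairwise order d hsk).imp_of_mem ?_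
      intro a b ha hb hr
      obtain ⟨hao, _⟩ := picks_mem order d hsk a ha
      obtain ⟨hbo, _⟩ := picks_mem order d hsk b hb
      rw [rank_in order d.keys a.1 hao, rank_in order d.keys b.1 hbo]
      exact_mod_cast hr
    · have hk : d.keys.Pairwise (fun a b => List.idxOf a d.keys < List.idxOf b d.keys) :=
        nodup_pairwise_idxOf hn
      have hk2 : (d.items.map (fun x => x.1)).Pairwise
          (fun a b => List.idxOf a d.keys < List.idxOf b d.keys) := hk
      have hi : d.items.Pairwise
          (fun p q => List.idxOf p.1 d.keys < List.idxOf q.1 d.keys) :=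
        (List.pairwise_map
          (f := fun (x : String × (String × String × Bool)) => x.1)
          (R := fun a b => List.idxOf a d.keys < List.idxOf b d.keys)).mp hk2
      have hf := hi.sublist
        (List.filter_sublist (l := d.items) (p := fun p => !(order.contains p.1)))
      show ((d.items.filter _).map (fun x => x.2)).Pairwise _
      rw [List.pairwise_map]
      refine hf.imp_of_mem ?_
      intro p q hp hq hr
      have hpi := List.mem_filter.mp hp
      have hqi := List.mem_filter.mp hq
      have hpk : p.2.1 = p.1 := hsk p hpi.1
      have hqk : q.2.1 = q.1 := hsk q hqi.1
      have hpo : p.1 ∉ order := by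
        have := hpi.2; simp at this; exact this
      have hqo : q.1 ∉ order := by
        have := hqi.2; simp at this; exact this
      have hpm : p.1 ∈ d.keys := List.mem_map.mpr ⟨p, hpi.1, rfl⟩
      have hqm : q.1 ∈ d.keys := List.mem_map.mpr ⟨q, hqi.1, rfl⟩
      rw [hpk, hqk, rank_out order d.keys p.1 hpo hpm, rank_out order d.keys q.1 hqo hqm]
      omega
    · intro a ha b hb
      obtain ⟨hao, _⟩ := picks_mem order d hsk a ha
      obtain ⟨q, hq, rfl⟩ := List.mem_map.mp hb
      have hqi := List.mem_filter.mp hq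
      have hqk : q.2.1 = q.1 := hsk q hqi.1
      have hqo : q.1 ∉ order := by
        have := hqi.2; simp at this; exact this
      have hqm : q.1 ∈ d.keys := List.mem_map.mpr ⟨q, hqi.1, rfl⟩
      have hlt : List.idxOf a.1 order < order.length := List.idxOf_lt_length_of_mem hao
      rw [rank_in order d.keys a.1 hao, hqk, rank_out order d.keys q.1 hqo hqm]
      omega

-- ===== VERDICT (by name: the statement is the Claim_ definition above) =====
theorem order_attributes_py_spec : Claim_equal_order_attributes_py := by
  intro attributes order _
  show order_attributes_py attributes order = order_attributes_py_alt attributes order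
  unfold order_attributes_py order_attributes_py_alt
  simp only [aSplit_eq, bSplit_eq, List.nil_append, aOrder_acc,
    PySem.List.foldl_append_singleton]
  rw [sorted_eq_tail]
  · cases attributes.foldl cStep none <;> simp [List.append_assoc]
  · exact PySem.Dict.nodup_keys_foldl_insert_key _
      (fun (a : String × String × Bool) => a.1) (fun _ a => a) _
      PySem.Dict.nodup_keys_empty
  · exact selfKeyed_named _
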